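-- pv_equiv track=rewrite | github.com/eggding/red_rabbit | pyproject/gas/gas_mj/check_hu.py | rmSample
-- ===== SOURCE A (Python) =====
-- def rmSample( mj, mjArr, cnt=0 ):
--     i = cnt
--     j = 0
--     while i>0:
--         if mjArr.count( mj ):
--             mjArr.remove( mj )
--             j += 1
--         i -= 1
--     return j
-- ===== SOURCE B (Python) =====
-- def rmSample(mj, mjArr, cnt=0):
--     removed = 0
--     kept = []
--     for x in mjArr:
--         if removed < cnt and (x is mj or x == mj):
--             removed += 1
--         else:
--             kept.append(x)
--     mjArr[:] = kept
--     return removed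
-- ===== Notes on version B (the rewrite author's own statement) =====
-- stated objective: faster
-- what changed: Replaces the cnt-iteration while loop with its repeated count()+remove() scans by a single pass that keeps a removed counter and rebuilds the list once (slice-assigned back in place).
import Mathlib
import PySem

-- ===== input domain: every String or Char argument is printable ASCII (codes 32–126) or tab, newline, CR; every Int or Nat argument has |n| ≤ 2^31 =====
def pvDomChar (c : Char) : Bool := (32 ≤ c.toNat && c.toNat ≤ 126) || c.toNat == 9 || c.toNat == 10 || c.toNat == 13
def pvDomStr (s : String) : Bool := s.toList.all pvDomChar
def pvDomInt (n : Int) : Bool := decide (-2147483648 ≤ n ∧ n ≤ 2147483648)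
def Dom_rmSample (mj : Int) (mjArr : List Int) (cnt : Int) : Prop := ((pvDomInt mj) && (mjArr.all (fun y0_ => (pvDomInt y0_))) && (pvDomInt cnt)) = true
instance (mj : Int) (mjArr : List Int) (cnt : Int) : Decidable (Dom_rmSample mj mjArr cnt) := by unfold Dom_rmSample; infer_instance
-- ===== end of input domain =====

-- B replaces A's cnt-iteration while loop (a count() scan and a remove() scan per
-- iteration) by a single pass with a removed counter; equivalence is about the return
-- value — both Pythons also mutate mjArr in place, identically (B via slice assignment).

-- ===== PORT A =====
-- while i>0: if mjArr.count(mj): mjArr.remove(mj); j += 1; i -= 1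
def rmLoopA (mj : Int) (arr : List Int) (i j : Int) : Int :=
  if _h : i > 0 then
    if PySem.List.count arr mj ≠ 0 then
      rmLoopA mj ((PySem.List.remove? arr mj).getD arr) (i - 1) (j + 1)
    else
      rmLoopA mj arr (i - 1) j
  else j
termination_by i.toNat
decreasing_by all_goals omega

def rmSample (mj : Int) (mjArr : List Int) (cnt : Int) : Int :=
  rmLoopA mj mjArr cnt 0

-- ===== PORT B =====
-- one pass: state = (removed, kept); drop x when removed < cnt and x == mj
def rmSample_alt (mj : Int) (mjArr : List Int) (cnt : Int) : Int :=
  (mjArr.foldl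
    (fun (s : Int × List Int) x =>
      if s.1 < cnt && x == mj then (s.1 + 1, s.2) else (s.1, s.2 ++ [x]))
    (0, [])).1

-- ===== PRECONDITION & SPEC =====
def Spec_rmSample (mj : Int) (mjArr : List Int) (cnt : Int) (out : Int) : Prop := out = rmSample_alt mj mjArr cnt
instance (mj : Int) (mjArr : List Int) (cnt : Int) (out : Int) : Decidable (Spec_rmSample mj mjArr cnt out) := by unfold Spec_rmSample; infer_instance

-- ===== CLAIM (what is proved, stated in full; the proofs are below) =====
def Claim_equal_rmSample : Prop := ∀ (mj : Int) (mjArr : List Int) (cnt : Int), Dom_rmSample mj mjArr cnt → Spec_rmSample mj mjArr cnt (rmSample mj mjArr cnt)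

-- ===== LEMMAS AND PROOFS =====

-- B's fold: first component is min cnt (r + count), clamped when r ≥ cnt already
theorem alt_fold_fst (mj cnt : Int) (xs : List Int) (r : Int) (ks : List Int) :
    (xs.foldl
      (fun (s : Int × List Int) x =>
        if s.1 < cnt && x == mj then (s.1 + 1, s.2) else (s.1, s.2 ++ [x]))
      (r, ks)).1 = if r < cnt then min cnt (r + (xs.count mj : Int)) else r := by
  induction xs generalizing r ks with
  | nil => simp; omega
  | cons x xs ih =>
    rw [List.foldl_cons]
    by_cases hx : x = mj
    · subst hx
      by_cases hr : r < cnt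
      · have step : (if ((r, ks).1 < cnt && x == x) then ((r, ks).1 + 1, (r, ks).2)
            else ((r, ks).1, (r, ks).2 ++ [x])) = ((r + 1 : Int), ks) := by simp [hr]
        rw [step, ih, List.count_cons_self, if_pos hr]
        push_cast
        split_ifs <;> omega
      · have step : (if ((r, ks).1 < cnt && x == x) then ((r, ks).1 + 1, (r, ks).2)
            else ((r, ks).1, (r, ks).2 ++ [x])) = (r, ks ++ [x]) := by simp [hr]
        rw [step, ih]
        simp [hr]
    · have step : (if ((r, ks).1 < cnt && x == mj) then ((r, ks).1 + 1, (r, ks).2)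
          else ((r, ks).1, (r, ks).2 ++ [x])) = (r, ks ++ [x]) := by simp [hx]
      rw [step, ih, List.count_cons]
      simp [hx]

-- A's loop: j plus min(max i 0, count)
theorem rmLoopA_eq (mj : Int) (arr : List Int) (i j : Int) :
    rmLoopA mj arr i j = j + min (max i 0) ((arr.count mj : Int)) := by
  by_cases hi : i > 0
  · by_cases hc : PySem.List.count arr mj ≠ 0
    · have hmem : mj ∈ arr := by
        simpa [PySem.List.count_eq, List.count_pos_iff] using Nat.pos_of_ne_zero hc
      have hrem : PySem.List.remove? arr mj = some (arr.erase mj) :=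
        PySem.List.remove?_eq_some_erase arr mj hmem
      have hcnt : (arr.erase mj).count mj = arr.count mj - 1 := List.count_erase_self
      have hpos : 1 ≤ arr.count mj := by
        simpa [PySem.List.count_eq] using Nat.one_le_iff_ne_zero.mpr hc
      rw [rmLoopA, dif_pos hi, if_pos hc, hrem]
      have := rmLoopA_eq mj (arr.erase mj) (i - 1) (j + 1)
      rw [Option.getD_some] at *
      rw [this, hcnt]
      push_cast [Nat.cast_sub hpos]
      omega
    · rw [rmLoopA, dif_pos hi, if_neg hc]
      have := rmLoopA_eq mj arr (i - 1) j
      rw [this]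
      have h0 : arr.count mj = 0 := by simpa [PySem.List.count_eq] using not_ne_iff.mp hc
      simp [h0]
  · rw [rmLoopA, dif_neg hi]
    have : (0 : Int) ≤ (arr.count mj : Int) := Int.natCast_nonneg _
    omega
termination_by i.toNat
decreasing_by all_goals omega

-- ===== VERDICT (by name: the statement is the Claim_ definition above) =====
theorem rmSample_spec : Claim_equal_rmSample := by
  intro mj mjArr cnt _
  unfold Spec_rmSample rmSample rmSample_alt
  rw [rmLoopA_eq, alt_fold_fst]
  have : (0 : Int) ≤ (mjArr.count mj : Int) := Int.natCast_nonneg _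
  split_ifs <;> omega
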